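-- pv_equiv track=rewrite | github.com/Ammaqr1/Dataset_feature_extraction | feature_extractor.py | extract_pandas_code
-- ===== SOURCE A (Python) =====
-- def extract_pandas_code(text_list):
--     """
--     Extracts the Pandas code from a list of text, including code blocks.
--
--     Parameters:
--     text_list (list): A list of text strings.
--
--     Returns:
--     str: The Pandas code string.
--     """
--     in_code_block = False
--     for line in text_list:
--         if line.startswith("```python"):
--             in_code_block = True
--         elif line.startswith("```"):
--             in_code_block = False
--         elif in_code_block and line.startswith("df["):
--             return line
--     return ""
-- ===== SOURCE B (Python) =====
-- def extract_pandas_code(text_list):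
--     # Two-pass decomposition: first mark which lines are eligible (inside a
--     # ```python block and not a fence line), then return the first eligible
--     # line starting with "df[".
--     eligible = []
--     inside = False
--     for line in text_list:
--         if line.startswith("```python"):
--             inside = True
--             eligible.append(False)
--         elif line.startswith("```"):
--             inside = False
--             eligible.append(False)
--         else:
--             eligible.append(inside)
--     for line, ok in zip(text_list, eligible):
--         if ok and line.startswith("df["):
--             return line
--     return ""
-- ===== Notes on version B (the rewrite author's own statement) =====
-- stated objective: alternative
-- what changed: Replaces A's single fused fence-state loop with a two-pass decomposition: a first pass builds a per-line eligibility flag list from the fence state machine, a second pass returns the first eligible line starting with 'df['.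
import Mathlib
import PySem

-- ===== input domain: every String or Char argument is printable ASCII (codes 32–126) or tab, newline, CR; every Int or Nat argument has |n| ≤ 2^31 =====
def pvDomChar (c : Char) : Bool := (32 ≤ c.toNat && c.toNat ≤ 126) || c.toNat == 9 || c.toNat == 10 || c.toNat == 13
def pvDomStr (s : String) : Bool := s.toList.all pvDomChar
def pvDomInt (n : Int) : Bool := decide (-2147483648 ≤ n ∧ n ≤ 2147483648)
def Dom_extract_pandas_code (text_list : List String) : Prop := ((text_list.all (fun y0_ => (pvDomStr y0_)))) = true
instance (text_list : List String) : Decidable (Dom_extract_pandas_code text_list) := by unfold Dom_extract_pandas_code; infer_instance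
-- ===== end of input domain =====

-- B replaces A's fused fence-state loop with a two-pass decomposition (flags pass, then search pass); objective: alternative.

-- ===== PORT A =====
def extract_pandas_code_go : List String → Bool → String
  | [], _ => ""
  | line :: rest, in_code_block =>
    if PySem.Str.startswith line "```python" then extract_pandas_code_go rest true
    else if PySem.Str.startswith line "```" then extract_pandas_code_go rest false
    else if in_code_block && PySem.Str.startswith line "df[" then line
    else extract_pandas_code_go rest in_code_block

def extract_pandas_code (text_list : List String) : String :=
  extract_pandas_code_go text_list false

-- ===== PORT B =====
-- first pass: eligibility flags from the fence state machine
def pvFlags : List String → Bool → List Bool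
  | [], _ => []
  | line :: rest, inside =>
    if PySem.Str.startswith line "```python" then false :: pvFlags rest true
    else if PySem.Str.startswith line "```" then false :: pvFlags rest false
    else inside :: pvFlags rest inside

-- second pass: first flagged line starting with "df["
def pvFindEligible : List (String × Bool) → String
  | [] => ""
  | (line, ok) :: rest =>
    if ok && PySem.Str.startswith line "df[" then line else pvFindEligible rest

def extract_pandas_code_alt (text_list : List String) : String :=
  pvFindEligible (text_list.zip (pvFlags text_list false))

-- ===== PRECONDITION & SPEC =====
def Spec_extract_pandas_code (text_list : List String) (out : String) : Prop := out = extract_pandas_code_alt text_list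
instance (text_list : List String) (out : String) : Decidable (Spec_extract_pandas_code text_list out) := by unfold Spec_extract_pandas_code; infer_instance

-- ===== CLAIM (what is proved, stated in full; the proofs are below) =====
def Claim_equal_extract_pandas_code : Prop := ∀ (text_list : List String), Dom_extract_pandas_code text_list → Spec_extract_pandas_code text_list (extract_pandas_code text_list)

-- ===== LEMMAS AND PROOFS =====
theorem go_eq_two_pass (l : List String) (b : Bool) :
    extract_pandas_code_go l b = pvFindEligible (l.zip (pvFlags l b)) := by
  induction l generalizing b with
  | nil => simp [extract_pandas_code_go, pvFlags, pvFindEligible]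
  | cons line rest ih =>
    simp only [extract_pandas_code_go, pvFlags]
    split_ifs with h1 h2 h3
    · simp [pvFindEligible, ih]
    · simp [pvFindEligible, ih]
    · simp_all [pvFindEligible]
    · simp only [List.zip_cons_cons, pvFindEligible]
      rw [if_neg (by simpa using h3), ih]

-- ===== VERDICT (by name: the statement is the Claim_ definition above) =====
theorem extract_pandas_code_spec : Claim_equal_extract_pandas_code := by
  intro l _
  unfold Spec_extract_pandas_code extract_pandas_code extract_pandas_code_alt
  exact go_eq_two_pass l false
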